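-- pv_equiv track=rewrite | github.com/hozan66/College-Practical-Code | Python (Cryptography)/pythonProject1/lab4(convert string to binary).py | string_to_binary
-- ===== SOURCE A (Python) =====
-- def string_to_binary(tx):
--     binary_list = list(tx)
--     final_result = ""
--
--     for i in binary_list:
--         result = ""
--         num = ord(i)
--         while num != 0:
--             result = str(num % 2) + result
--             num = num // 2
--         n = 8 - len(result)
--         result = '0' * n + result
--         final_result = final_result + result
--     return final_result
-- ===== SOURCE B (Python) =====
-- def string_to_binary(tx):
--     return ''.join(format(ord(c), '08b') for c in tx)
-- ===== Notes on version B (the rewrite author's own statement) =====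
-- stated objective: faster
-- what changed: Replaces the manual repeated-division bit loop with zero-replication padding and quadratic string concatenation by a single zero-padded binary format call per character joined in one pass.
import Mathlib
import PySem

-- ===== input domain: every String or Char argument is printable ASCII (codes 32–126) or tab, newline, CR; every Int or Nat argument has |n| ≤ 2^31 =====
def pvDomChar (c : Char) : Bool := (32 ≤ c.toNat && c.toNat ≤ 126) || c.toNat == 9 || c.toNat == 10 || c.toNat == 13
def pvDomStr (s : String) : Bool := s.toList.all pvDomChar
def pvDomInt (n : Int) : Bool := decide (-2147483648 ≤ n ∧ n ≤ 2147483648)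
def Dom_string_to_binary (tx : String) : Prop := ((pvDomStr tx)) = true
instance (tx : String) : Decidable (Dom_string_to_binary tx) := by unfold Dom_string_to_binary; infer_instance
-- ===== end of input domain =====

-- B replaces A's manual repeated-division bit loop and '0'*n padding by one zero-padded
-- library binary-format call per character, joined in a single pass (idiomatic; return value only).
-- Python strings are ported as List Char (PySem.Chars) and wrapped with String.ofList at the end.

-- ===== PORT A =====
-- A's inner while-loop: num starts at ord(i) ≥ 0, so it is ported on Nat, where
-- Lean's % and / coincide with Python's % and // (exact for nonnegative num).
-- fuel (= the initial num, enough since num halves each step) only makes the loop total.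
def pvLoopA : Nat → Nat → List Char → List Char
  | 0, _, result => result
  | fuel+1, num, result =>
    if num = 0 then result
    else pvLoopA fuel (num / 2) (PySem.Int.toChars ((num % 2 : Nat) : Int) ++ result)

def string_to_binary (tx : String) : String :=
  let binary_list := tx.toList
  String.ofList (binary_list.foldl (fun final_result i =>
    let result := pvLoopA i.toNat i.toNat []
    let n := 8 - result.length     -- Python '0' * n is empty for n ≤ 0; Nat subtraction matches
    let result := List.replicate n '0' ++ result
    final_result ++ result) [])

-- ===== PORT B =====
-- format(ord(c), '08b') = binary digits zero-padded to width 8 = PySem.Int.toBinChars + PySem.Chars.zfill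
def pvCharBits (c : Char) : List Char :=
  PySem.Chars.zfill (PySem.Int.toBinChars (c.toNat : Int)) 8

def string_to_binary_alt (tx : String) : String :=
  String.ofList (PySem.Chars.join [] (tx.toList.map pvCharBits))

-- ===== PRECONDITION & SPEC =====
def Spec_string_to_binary (tx : String) (out : String) : Prop := out = string_to_binary_alt tx
instance (tx : String) (out : String) : Decidable (Spec_string_to_binary tx out) := by unfold Spec_string_to_binary; infer_instance

-- ===== CLAIM (what is proved, stated in full; the proofs are below) =====
def Claim_equal_string_to_binary : Prop := ∀ (tx : String), Dom_string_to_binary tx → Spec_string_to_binary tx (string_to_binary tx)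

-- ===== LEMMAS AND PROOFS =====

-- Per-character agreement on every code the domain admits (≤ 126), by evaluation.
theorem pv_char_eq : ∀ n : Nat, n ≤ 126 →
    (List.replicate (8 - (pvLoopA n n []).length) '0' ++ pvLoopA n n [])
      = PySem.Chars.zfill (PySem.Int.toBinChars (n : Int)) 8 := by
  decide

theorem pv_char_eq' (c : Char) (h : pvDomChar c = true) :
    (List.replicate (8 - (pvLoopA c.toNat c.toNat []).length) '0' ++ pvLoopA c.toNat c.toNat []) = pvCharBits c := by
  have : c.toNat ≤ 126 := by
    unfold pvDomChar at h
    simp only [Bool.or_eq_true, Bool.and_eq_true, decide_eq_true_eq, beq_iff_eq] at h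
    omega
  exact pv_char_eq c.toNat this

theorem pv_join_cons (x : List Char) (xs : List (List Char)) :
    PySem.Chars.join [] (x :: xs) = x ++ PySem.Chars.join [] xs := by
  cases xs with
  | nil => simp [PySem.Chars.join_singleton, PySem.Chars.join_nil]
  | cons y ys => simp [PySem.Chars.join_cons_cons]

theorem pv_fold_join (l : List Char) (h : l.all pvDomChar = true) (acc : List Char) :
    l.foldl (fun final_result i =>
      final_result ++ (List.replicate (8 - (pvLoopA i.toNat i.toNat []).length) '0' ++ pvLoopA i.toNat i.toNat [])) acc
    = acc ++ PySem.Chars.join [] (l.map pvCharBits) := by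
  induction l generalizing acc with
  | nil => simp [PySem.Chars.join_nil]
  | cons c cs ih =>
    simp only [List.all_cons, Bool.and_eq_true] at h
    simp only [List.foldl_cons, List.map_cons, pv_join_cons]
    rw [ih h.2, pv_char_eq' c h.1, List.append_assoc]

-- ===== VERDICT (by name: the statement is the Claim_ definition above) =====
theorem string_to_binary_spec : Claim_equal_string_to_binary := by
  intro tx hdom
  unfold Spec_string_to_binary string_to_binary string_to_binary_alt
  simp only []
  rw [pv_fold_join tx.toList hdom []]
  rfl
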